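-- pv_equiv track=rewrite | github.com/BrandoWilhan/Montador-Assembly | test.py | register_code
-- ===== SOURCE A (Python) =====
-- def register_code(register):
--     reg = ' '
--     for c in range(1, 32):
--         if(register == str(c)):
--             reg = bin(c)[2:]
--             reg1 = reg.split()
--             if(len(reg) < 2):
--                 reg1.insert(0, '0')
--                 reg1.insert(0, '0')
--                 reg1.insert(0, '0')
--                 reg1.insert(0, '0')
--             elif(len(reg) < 3):
--                 reg1.insert(0, '0')
--                 reg1.insert(0, '0')
--                 reg1.insert(0, '0')
--             elif(len(reg) < 4):
--                 reg1.insert(0, '0')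
--                 reg1.insert(0, '0')
--             elif(len(reg) < 5):
--                 reg1.insert(0, '0')
--             reg = ''.join(reg1)
--
--     return reg
-- ===== SOURCE B (Python) =====
-- def register_code(register):
--     # 5-bit code of registers 1..31 (exact string match), ' ' otherwise.
--     if register in {str(i) for i in range(1, 32)}:
--         return format(int(register), '05b')
--     return ' '
-- ===== Notes on version B (the rewrite author's own statement) =====
-- stated objective: simpler
-- what changed: B replaces A's 1..31 scan with hand-padded conditional inserts by a set-membership test followed by a direct zero-padded binary format.
import Mathlib
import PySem

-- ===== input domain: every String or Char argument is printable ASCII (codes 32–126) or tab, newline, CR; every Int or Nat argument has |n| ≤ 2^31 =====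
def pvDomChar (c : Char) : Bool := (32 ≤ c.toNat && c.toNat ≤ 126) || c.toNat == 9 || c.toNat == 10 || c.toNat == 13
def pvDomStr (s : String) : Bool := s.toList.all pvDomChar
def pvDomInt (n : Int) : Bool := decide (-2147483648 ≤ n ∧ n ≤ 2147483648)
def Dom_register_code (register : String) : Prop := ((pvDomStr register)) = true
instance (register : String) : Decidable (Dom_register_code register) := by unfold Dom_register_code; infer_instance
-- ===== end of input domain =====

-- B replaces A's 1..31 scan with hand-padded conditional inserts by a set-membership test
-- followed by a direct zero-padded binary format; objective: simpler.


-- ===== PORT A =====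
def register_code (register : String) : String :=
  (PySem.List.pyRange 1 32 1).foldl (fun reg c =>
    if register == PySem.Int.toStr c then
      let reg' := PySem.Str.slice (PySem.Int.pyBin c) (some 2) none
      let reg1 := PySem.Str.split₀ reg'
      let reg1 :=
        if PySem.Str.len reg' < 2 then
          PySem.List.insert (PySem.List.insert (PySem.List.insert (PySem.List.insert reg1 0 "0") 0 "0") 0 "0") 0 "0"
        else if PySem.Str.len reg' < 3 then
          PySem.List.insert (PySem.List.insert (PySem.List.insert reg1 0 "0") 0 "0") 0 "0"
        else if PySem.Str.len reg' < 4 then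
          PySem.List.insert (PySem.List.insert reg1 0 "0") 0 "0"
        else if PySem.Str.len reg' < 5 then
          PySem.List.insert reg1 0 "0"
        else reg1
      PySem.Str.join "" reg1
    else reg) " "

-- ===== PORT B =====
def register_code_alt (register : String) : String :=
  let valid : PySem.Set String :=
    PySem.Set.ofList ((PySem.List.pyRange 1 32 1).map PySem.Int.toStr)
  if PySem.Set.contains valid register then
    -- int(register) cannot raise here (register is str(i) for some i); none is unreachable
    match PySem.Int.ofStr? register with
    | some n => PySem.Str.zfill (PySem.Int.toBin n) 5
    | none => " "
  else " "

-- ===== PRECONDITION & SPEC =====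
def Spec_register_code (register : String) (out : String) : Prop := out = register_code_alt register
instance (register : String) (out : String) : Decidable (Spec_register_code register out) := by unfold Spec_register_code; infer_instance

-- ===== CLAIM (what is proved, stated in full; the proofs are below) =====
def Claim_equal_register_code : Prop := ∀ (register : String), Dom_register_code register → Spec_register_code register (register_code register)

-- ===== LEMMAS AND PROOFS =====

-- The 31 valid register strings, written out.
def pvValidList : List String :=
  ["1","2","3","4","5","6","7","8","9","10","11","12","13","14","15","16",
   "17","18","19","20","21","22","23","24","25","26","27","28","29","30","31"]

theorem pvValidList_eq : (PySem.List.pyRange 1 32 1).map PySem.Int.toStr = pvValidList := by decide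

-- If no iteration's test fires, A's loop returns its accumulator unchanged.
theorem pvFoldl_no_match (register : String) (l : List Int) (r : String)
    (h : ∀ c ∈ l, ¬ (register == PySem.Int.toStr c) = true) :
    l.foldl (fun reg c =>
      if register == PySem.Int.toStr c then
        let reg' := PySem.Str.slice (PySem.Int.pyBin c) (some 2) none
        let reg1 := PySem.Str.split₀ reg'
        let reg1 :=
          if PySem.Str.len reg' < 2 then
            PySem.List.insert (PySem.List.insert (PySem.List.insert (PySem.List.insert reg1 0 "0") 0 "0") 0 "0") 0 "0"
          else if PySem.Str.len reg' < 3 then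
            PySem.List.insert (PySem.List.insert (PySem.List.insert reg1 0 "0") 0 "0") 0 "0"
          else if PySem.Str.len reg' < 4 then
            PySem.List.insert (PySem.List.insert reg1 0 "0") 0 "0"
          else if PySem.Str.len reg' < 5 then
            PySem.List.insert reg1 0 "0"
          else reg1
        PySem.Str.join "" reg1
      else reg) r = r := by
  induction l generalizing r with
  | nil => rfl
  | cons c t ih =>
      simp only [List.foldl_cons]
      rw [if_neg (h c (List.mem_cons_self))]
      exact ih r (fun x hx => h x (List.mem_cons_of_mem _ hx))

-- ===== VERDICT (by name: the statement is the Claim_ definition above) =====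
theorem register_code_spec : Claim_equal_register_code := by
  intro register _
  unfold Spec_register_code
  by_cases hm : register ∈ pvValidList
  · fin_cases hm <;> decide
  · -- B returns ' '
    have hb : register_code_alt register = " " := by
      unfold register_code_alt
      rw [if_neg]
      simp only [PySem.Set.contains]
      intro hc
      exact hm (pvValidList_eq ▸
        (PySem.Set.mem_ofList _ register).mp (by simpa using hc))
    -- A returns ' '
    have ha : register_code register = " " := by
      unfold register_code
      apply pvFoldl_no_match
      intro c hc hbeq
      apply hm
      rw [← pvValidList_eq]
      exact List.mem_map.mpr ⟨c, hc, (beq_iff_eq.mp hbeq).symm⟩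
    rw [ha, hb]
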